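-- pv_equiv track=rewrite | github.com/gwon477/TIL | 소프티어/플레이페어 암호(Softeer).py | preprocess_message
-- ===== SOURCE A (Python) =====
-- def preprocess_message(message):
--     processed = []
--     i = 0
--
--     while i < len(message):
--         if i == len(message) - 1:
--             processed.append(message[i] + 'X')
--             break
--
--         if message[i] == message[i+1]:
--             if message[i] == 'X':
--                 processed.append(message[i] + 'Q')
--             else:
--                 processed.append(message[i] + 'X')
--             i += 1
--         else:
--             processed.append(message[i] + message[i+1])
--             i += 2
--
--     return processed
-- ===== SOURCE B (Python) =====
-- def preprocess_message(message):
--     processed = []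
--     prev = None
--     for c in message:
--         if prev is None:
--             prev = c
--         elif prev == c:
--             processed.append(prev + ('Q' if prev == 'X' else 'X'))
--             prev = c
--         else:
--             processed.append(prev + c)
--             prev = None
--     if prev is not None:
--         processed.append(prev + 'X')
--     return processed
-- ===== Notes on version B (the rewrite author's own statement) =====
-- stated objective: idiomatic
-- what changed: Replaced the index/lookahead while-loop with variable step by a single forward for-loop over the characters maintaining one pending character (a state machine), padding the leftover pending char at the end; iterating characters directly avoids repeated message[i] indexing.
import Mathlib
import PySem

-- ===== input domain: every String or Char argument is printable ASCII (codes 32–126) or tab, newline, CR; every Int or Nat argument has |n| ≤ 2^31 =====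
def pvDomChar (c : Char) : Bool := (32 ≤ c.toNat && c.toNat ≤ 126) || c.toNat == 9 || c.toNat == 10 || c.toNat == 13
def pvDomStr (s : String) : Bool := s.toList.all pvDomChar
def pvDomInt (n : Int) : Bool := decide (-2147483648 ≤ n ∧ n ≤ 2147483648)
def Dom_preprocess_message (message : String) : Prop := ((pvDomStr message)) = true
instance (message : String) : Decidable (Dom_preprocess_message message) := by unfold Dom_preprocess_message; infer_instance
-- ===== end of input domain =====

-- B replaces A's index/lookahead loop with variable step by a one-pass pending-character
-- state machine (more idiomatic); same output, return value only, no speed claim.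

-- ===== PORT A =====
-- A's while-loop over index i (step 1 on an equal pair, 2 otherwise, break at the last
-- char) transcribed as structural recursion on the remaining characters.
def pmA : List Char → List String
  | [] => []
  | [c] => [String.mk [c, 'X']]
  | a :: b :: rest =>
    if a == b then
      (if a == 'X' then String.mk [a, 'Q'] else String.mk [a, 'X']) :: pmA (b :: rest)
    else
      String.mk [a, b] :: pmA rest

def preprocess_message (message : String) : List String := pmA message.toList

-- ===== PORT B =====
-- B's for-loop with pending char `prev : Option Char`, plus the final padding step.
def pmB : Option Char → List Char → List String
  | none, [] => []
  | some p, [] => [String.mk [p, 'X']]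
  | none, c :: rest => pmB (some c) rest
  | some p, c :: rest =>
    if p == c then
      String.mk [p, if p == 'X' then 'Q' else 'X'] :: pmB (some c) rest
    else
      String.mk [p, c] :: pmB none rest

def preprocess_message_alt (message : String) : List String := pmB none message.toList

-- ===== PRECONDITION & SPEC =====
def Spec_preprocess_message (message : String) (out : List String) : Prop := out = preprocess_message_alt message
instance (message : String) (out : List String) : Decidable (Spec_preprocess_message message out) := by unfold Spec_preprocess_message; infer_instance

-- ===== CLAIM (what is proved, stated in full; the proofs are below) =====
def Claim_equal_preprocess_message : Prop := ∀ (message : String), Dom_preprocess_message message → Spec_preprocess_message message (preprocess_message message)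

-- ===== LEMMAS AND PROOFS =====
theorem pmA_eq_pmB (l : List Char) :
    pmA l = pmB none l ∧ ∀ a, pmA (a :: l) = pmB (some a) l := by
  induction l with
  | nil => exact ⟨rfl, fun a => rfl⟩
  | cons c rest ih =>
    refine ⟨?_, fun a => ?_⟩
    · rw [show pmB none (c :: rest) = pmB (some c) rest from rfl, ← ih.2 c]
    · by_cases h : a = c
      · subst h
        simp only [pmA, pmB, beq_self_eq_true, if_true, ih.2 a]
        split_ifs <;> rfl
      · simp only [pmA, pmB, beq_eq_false_iff_ne.mpr h, Bool.false_eq_true, if_false,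
          beq_iff_eq, h, ih.1]

-- ===== VERDICT (by name: the statement is the Claim_ definition above) =====
theorem preprocess_message_spec : Claim_equal_preprocess_message := by
  intro message _
  unfold Spec_preprocess_message preprocess_message preprocess_message_alt
  exact (pmA_eq_pmB message.toList).1
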